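-- pv_equiv track=rewrite | github.com/hastic-zzz/hastic-server | analytics/utils/__init__.py | intersection_segment
-- ===== SOURCE A (Python) =====
-- def intersection_segment(data, median):
--     """
--     Finds all intersections between flatten data and median
--     """
--     cen_ind = []
--     for i in range(1, len(data)-1):
--         if data[i - 1] < median and data[i + 1] > median:
--             cen_ind.append(i)
--     del_ind = []
--     for i in range(1, len(cen_ind)):
--         if cen_ind[i] == cen_ind[i - 1] + 1:
--             del_ind.append(i - 1)
--
--     return [x for (idx, x) in enumerate(cen_ind) if idx not in del_ind]
-- ===== SOURCE B (Python) =====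
-- def intersection_segment(data, median):
--     """
--     Finds all intersections between flatten data and median
--     """
--     n = len(data)
--
--     def is_cross(i):
--         return data[i - 1] < median and data[i + 1] > median
--
--     result = []
--     for i in range(1, n - 1):
--         if is_cross(i) and not (i + 1 < n - 1 and is_cross(i + 1)):
--             result.append(i)
--     return result
-- ===== Notes on version B (the rewrite author's own statement) =====
-- stated objective: simpler
-- what changed: A builds the crossing-index list, then a second pass records indices of consecutive pairs, then a third comprehension rebuilds the list by index membership; B is one pass over the data positions keeping a crossing index only when the next position is not also a crossing (look-ahead), with no intermediate index lists.
import Mathlib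
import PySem

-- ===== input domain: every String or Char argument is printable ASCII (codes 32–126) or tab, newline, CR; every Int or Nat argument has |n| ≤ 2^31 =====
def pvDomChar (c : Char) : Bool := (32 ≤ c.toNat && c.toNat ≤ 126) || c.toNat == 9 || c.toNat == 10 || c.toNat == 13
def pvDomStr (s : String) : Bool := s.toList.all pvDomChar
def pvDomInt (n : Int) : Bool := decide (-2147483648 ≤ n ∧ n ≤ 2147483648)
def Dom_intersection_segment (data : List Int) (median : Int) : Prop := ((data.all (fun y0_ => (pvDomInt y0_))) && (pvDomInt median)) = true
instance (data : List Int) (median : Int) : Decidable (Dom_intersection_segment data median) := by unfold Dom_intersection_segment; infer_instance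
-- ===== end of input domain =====

-- B replaces A's three passes (collect crossings, mark consecutive runs, rebuild by index) with a
-- single look-ahead pass that keeps a crossing index only when the next index is not also one (simpler).

-- ===== PORT A =====
def intersection_segment (data : List Int) (median : Int) : List Int :=
  let cen_ind : List Int :=
    (PySem.List.pyRange 1 ((data.length : Int) - 1) 1).foldl
      (fun acc i =>
        if PySem.List.pyGetD data (i - 1) 0 < median ∧ median < PySem.List.pyGetD data (i + 1) 0
        then acc ++ [i] else acc) []
  let del_ind : List Int :=
    (PySem.List.pyRange 1 (cen_ind.length : Int) 1).foldl
      (fun acc i =>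
        if PySem.List.pyGetD cen_ind i 0 = PySem.List.pyGetD cen_ind (i - 1) 0 + 1
        then acc ++ [i - 1] else acc) []
  ((PySem.List.enumerate cen_ind 0).filter (fun p => decide (p.1 ∉ del_ind))).map (fun p => p.2)

-- ===== PORT B =====
def intersection_segment_alt (data : List Int) (median : Int) : List Int :=
  let n : Int := data.length
  let is_cross : Int → Bool := fun i =>
    decide (PySem.List.pyGetD data (i - 1) 0 < median) &&
    decide (median < PySem.List.pyGetD data (i + 1) 0)
  (PySem.List.pyRange 1 (n - 1) 1).foldl
    (fun acc i =>
      if is_cross i && !(decide (i + 1 < n - 1) && is_cross (i + 1))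
      then acc ++ [i] else acc) []

-- ===== PRECONDITION & SPEC =====
def Spec_intersection_segment (data : List Int) (median : Int) (out : List Int) : Prop := out = intersection_segment_alt data median
instance (data : List Int) (median : Int) (out : List Int) : Decidable (Spec_intersection_segment data median out) := by unfold Spec_intersection_segment; infer_instance

-- ===== CLAIM (what is proved, stated in full; the proofs are below) =====
def Claim_equal_intersection_segment : Prop := ∀ (data : List Int) (median : Int), Dom_intersection_segment data median → Spec_intersection_segment data median (intersection_segment data median)

-- ===== LEMMAS AND PROOFS =====

lemma mem_enum {α : Type} (l : List α) (s : Int) (p : Int × α)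
    (hp : p ∈ PySem.List.enumerate l s) :
    ∃ k : Nat, ∃ hk : k < l.length, p.1 = s + k ∧ p.2 = l[k] := by
  induction l generalizing s with
  | nil => simp [PySem.List.enumerate] at hp
  | cons x xs ih =>
    rw [PySem.List.enumerate_cons] at hp
    rcases List.mem_cons.mp hp with h | h
    · exact ⟨0, by simp, by simp [h], by simp [h]⟩
    · obtain ⟨k, hk, h1, h2⟩ := ih (s+1) h
      exact ⟨k+1, by simpa using hk, by omega, by simpa using h2⟩

lemma enum_filter_map {α : Type} (l : List α) (s : Int) (P : Int × α → Bool) (Q : α → Bool)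
    (h : ∀ p ∈ PySem.List.enumerate l s, P p = Q p.2) :
    ((PySem.List.enumerate l s).filter P).map Prod.snd = l.filter Q := by
  induction l generalizing s with
  | nil => simp [PySem.List.enumerate]
  | cons x xs ih =>
    rw [PySem.List.enumerate_cons] at h ⊢
    have hx := h (s, x) (by simp)
    have ihe := ih (s+1) (fun p hp => h p (by simp [hp]))
    by_cases hq : Q x
    · simp [hx, hq, ihe]
    · simp [hx, hq, ihe]

lemma succ_mem_iff (l : List Int) (hl : l.Pairwise (· < ·)) (k : Nat) (hk : k < l.length) :
    (l[k] + 1 ∈ l) ↔ l[k+1]? = some (l[k] + 1) := by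
  have mono := List.pairwise_iff_getElem.mp hl
  constructor
  · intro hmem
    obtain ⟨j, hj, hjv⟩ := List.mem_iff_getElem.mp hmem
    have hkj : k < j := by
      by_contra hle
      rcases Nat.lt_or_ge j k with h | h
      · have := mono j k hj hk h; omega
      · have : j = k := by omega
        subst this; omega
    have hk1 : k + 1 < l.length := by omega
    have h1 : l[k] < l[k+1] := mono k (k+1) hk hk1 (by omega)
    have h2 : l[k+1] ≤ l[j] := by
      rcases Nat.lt_or_ge (k+1) j with h | h
      · exact le_of_lt (mono (k+1) j hk1 hj h)
      · have : k + 1 = j := by omega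
        subst this; exact le_refl _
    rw [List.getElem?_eq_getElem hk1]
    congr 1; omega
  · intro h
    have := List.getElem?_eq_some_iff.mp h
    obtain ⟨hk1, hv⟩ := this
    rw [← hv]; exact List.getElem_mem hk1

lemma del_char (l : List Int) (j : Int) :
    (j ∈ (((PySem.List.pyRange 1 (l.length : Int) 1).filter
        (fun x => decide (PySem.List.pyGetD l x 0 = PySem.List.pyGetD l (x - 1) 0 + 1))).map
        (fun x => x - 1)))
    ↔ (0 ≤ j ∧ j + 1 < (l.length : Int) ∧
        PySem.List.pyGetD l (j + 1) 0 = PySem.List.pyGetD l j 0 + 1) := by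
  simp only [List.mem_map, List.mem_filter, PySem.List.mem_pyRange_one, decide_eq_true_eq]
  constructor
  · rintro ⟨i, ⟨⟨h1, h2⟩, hq⟩, rfl⟩
    refine ⟨by omega, by omega, ?_⟩
    have h3 : i - 1 + 1 = i := by ring
    rw [h3]; exact hq
  · rintro ⟨h0, h1, hq⟩
    refine ⟨j + 1, ⟨⟨by omega, by omega⟩, by simpa using hq⟩, by ring⟩

lemma keep_iff (l : List Int) (hl : l.Pairwise (· < ·)) (k : Nat) (hk : k < l.length) :
    ((k : Int) ∈ (((PySem.List.pyRange 1 (l.length : Int) 1).filter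
        (fun x => decide (PySem.List.pyGetD l x 0 = PySem.List.pyGetD l (x - 1) 0 + 1))).map
        (fun x => x - 1)))
    ↔ l[k] + 1 ∈ l := by
  rw [del_char, succ_mem_iff l hl k hk, List.getElem?_eq_some_iff]
  have hg : PySem.List.pyGetD l (k : Int) 0 = l[k] := by
    rw [PySem.List.pyGetD_natCast, List.getD_eq_getElem _ _ hk]
  constructor
  · rintro ⟨h0, h1, hq⟩
    have hk1 : k + 1 < l.length := by omega
    refine ⟨hk1, ?_⟩
    have : PySem.List.pyGetD l ((k : Int) + 1) 0 = l[k + 1] := by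
      have hcast : (k : Int) + 1 = ((k + 1 : Nat) : Int) := by push_cast; ring
      rw [hcast, PySem.List.pyGetD_natCast, List.getD_eq_getElem _ _ hk1]
    rw [this, hg] at hq; exact hq
  · rintro ⟨hk1, hv⟩
    refine ⟨by omega, by exact_mod_cast by omega, ?_⟩
    have hcast : (k : Int) + 1 = ((k + 1 : Nat) : Int) := by push_cast; ring
    rw [hcast, PySem.List.pyGetD_natCast, List.getD_eq_getElem _ _ hk1, hg, hv]

lemma a_side (c : Int → Bool) (m : Int)
    (l : List Int) (hlst : l = (PySem.List.pyRange 1 m 1).filter c) :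
    ((PySem.List.enumerate l).filter (fun p => decide (p.1 ∉
        (((PySem.List.pyRange 1 (l.length : Int) 1).filter
          (fun x => decide (PySem.List.pyGetD l x 0 = PySem.List.pyGetD l (x - 1) 0 + 1))).map
          (fun x => x - 1))))).map (fun p => p.2)
    = l.filter (fun x => decide (x + 1 ∉ l)) := by
  have hl : l.Pairwise (· < ·) := by
    rw [hlst]; exact (PySem.List.pairwise_lt_pyRange_one 1 m).filter c
  apply enum_filter_map l 0
  intro p hp
  obtain ⟨k, hk, h1, h2⟩ := mem_enum l 0 p hp
  simp only [h1, zero_add, h2, decide_eq_decide]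
  exact not_congr (keep_iff l hl k hk)

lemma b_side (c : Int → Bool) (m : Int)
    (l : List Int) (hlst : l = (PySem.List.pyRange 1 m 1).filter c) :
    l.filter (fun x => decide (x + 1 ∉ l))
    = (PySem.List.pyRange 1 m 1).filter (fun x => c x && !(decide (x + 1 < m) && c (x + 1))) := by
  conv_lhs => rw [hlst, List.filter_filter]
  apply List.filter_congr
  intro x hx
  have hx1 : 1 ≤ x := (PySem.List.mem_pyRange_one.mp hx).1
  have hmem : (x + 1 ∈ l) ↔ (1 ≤ x + 1 ∧ x + 1 < m ∧ c (x + 1) = true) := by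
    rw [hlst]
    simp [List.mem_filter, PySem.List.mem_pyRange_one, and_assoc]
  by_cases hcx : c x
  · by_cases hlt : x + 1 < m
    · by_cases hc1 : c (x + 1)
      · simp [hcx, hlt, hc1]; omega
      · simp [hcx, hlt, hc1]
    · simp [hcx, hlt]
  · simp [hcx]

lemma main_eq (data : List Int) (median : Int) :
    intersection_segment data median = intersection_segment_alt data median := by
  unfold intersection_segment intersection_segment_alt
  simp only [PySem.List.foldl_append_ite_eq_filter, PySem.List.foldl_append_ite,
             List.nil_append, Bool.decide_and, Bool.decide_eq_true]
  rw [a_side _ ((data.length : Int) - 1) _ rfl, b_side _ ((data.length : Int) - 1) _ rfl]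

-- ===== VERDICT (by name: the statement is the Claim_ definition above) =====
theorem intersection_segment_spec : Claim_equal_intersection_segment := by
  intro data median _
  exact main_eq data median
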